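-- pv_equiv track=rewrite | github.com/Yassinecoder06/ACM | Real Contests/Codequest 2.0/I. Symmetry of Love.py | deletion_cost
-- ===== SOURCE A (Python) =====
-- def humming_distance(ch1, ch2):
--     d = abs(ord(ch1) - ord(ch2))
--     return min(d, 26 - d)
--
-- def deletion_cost(s, k):
--     cost = 0
--     l, r = 0, len(s)-1
--     while l < r:
--         if l == k:
--             l += 1
--             continue
--         if r == k:
--             r -= 1
--             continue
--         cost += humming_distance(s[l], s[r])
--         l += 1
--         r -= 1
--     return cost
-- ===== SOURCE B (Python) =====
-- def humming_distance(ch1, ch2):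
--     d = abs(ord(ch1) - ord(ch2))
--     return min(d, 26 - d)
--
-- def symmetric_cost(t):
--     n = len(t)
--     cost = 0
--     for i in range(n // 2):
--         cost += humming_distance(t[i], t[n - 1 - i])
--     return cost
--
-- def deletion_cost(s, k):
--     t = s[:k] + s[k+1:] if 0 <= k < len(s) else s
--     return symmetric_cost(t)
-- ===== Notes on version B (the rewrite author's own statement) =====
-- stated objective: simpler
-- what changed: B first materialises the string with index k removed (guarded so out-of-range/negative k is a no-op) and then runs a single uniform symmetric range(n//2) scan, replacing A's two-pointer loop with interleaved skip branches.
import Mathlib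
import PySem

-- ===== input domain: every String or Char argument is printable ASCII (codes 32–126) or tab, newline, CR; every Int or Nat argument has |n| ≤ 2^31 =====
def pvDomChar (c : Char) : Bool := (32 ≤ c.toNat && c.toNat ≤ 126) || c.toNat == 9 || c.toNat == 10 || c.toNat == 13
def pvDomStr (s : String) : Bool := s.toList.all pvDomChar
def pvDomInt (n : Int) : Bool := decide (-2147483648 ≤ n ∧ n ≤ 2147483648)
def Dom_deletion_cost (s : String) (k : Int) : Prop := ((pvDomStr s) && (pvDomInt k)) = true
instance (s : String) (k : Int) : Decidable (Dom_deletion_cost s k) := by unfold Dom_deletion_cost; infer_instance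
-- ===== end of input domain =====

-- B removes index k up front (no-op for out-of-range k) and does one uniform symmetric scan; objective: simpler.

-- shared helper (identical in both Python files): min(|ord c1 - ord c2|, 26 - |ord c1 - ord c2|)
def humming_distance (c1 c2 : Char) : Int :=
  let d : Int := |(c1.toNat : Int) - (c2.toNat : Int)|
  min d (26 - d)

-- ===== PORT A =====
-- the while loop of A; s[l]/s[r] are always in range while l < r with 0 ≤ l, r < len,
-- so pyGetD is exact here
def deletionLoopA (cs : List Char) (k : Int) (cost l r : Int) : Int :=
  if l < r then
    if l = k then deletionLoopA cs k cost (l + 1) r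
    else if r = k then deletionLoopA cs k cost l (r - 1)
    else
      deletionLoopA cs k
        (cost + humming_distance (PySem.List.pyGetD cs l ' ') (PySem.List.pyGetD cs r ' '))
        (l + 1) (r - 1)
  else cost
termination_by (r - l).toNat
decreasing_by all_goals omega

def deletion_cost (s : String) (k : Int) : Int :=
  deletionLoopA s.toList k 0 0 ((s.toList.length : Int) - 1)

-- ===== PORT B =====
-- helper symmetric_cost of Source B: for i in range(n // 2): cost += humming_distance(t[i], t[n-1-i])
def symmetric_cost (t : List Char) : Int :=
  (PySem.List.pyRange 0 (PySem.Int.floordiv (t.length : Int) 2) 1).foldl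
    (fun cost i =>
      cost + humming_distance (PySem.List.pyGetD t i ' ')
        (PySem.List.pyGetD t ((t.length : Int) - 1 - i) ' '))
    0

def deletion_cost_alt (s : String) (k : Int) : Int :=
  -- t = s[:k] + s[k+1:] if 0 <= k < len(s) else s
  symmetric_cost
    (if 0 ≤ k ∧ k < (s.toList.length : Int) then
      PySem.List.slice s.toList none (some k) ++ PySem.List.slice s.toList (some (k + 1)) none
    else s.toList)

-- ===== PRECONDITION & SPEC =====
def Spec_deletion_cost (s : String) (k : Int) (out : Int) : Prop := out = deletion_cost_alt s k
instance (s : String) (k : Int) (out : Int) : Decidable (Spec_deletion_cost s k out) := by unfold Spec_deletion_cost; infer_instance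

-- ===== CLAIM (what is proved, stated in full; the proofs are below) =====
def Claim_equal_deletion_cost : Prop := ∀ (s : String) (k : Int), Dom_deletion_cost s k → Spec_deletion_cost s k (deletion_cost s k)

-- ===== LEMMAS AND PROOFS =====

-- generic two-pointer accumulation, the common denominator of both programs
def twoPtr (t : List Char) (cost l r : Int) : Int :=
  if l < r then
    twoPtr t (cost + humming_distance (PySem.List.pyGetD t l ' ') (PySem.List.pyGetD t r ' '))
      (l + 1) (r - 1)
  else cost
termination_by (r - l).toNat
decreasing_by omega

-- B's fold over range(n//2) equals the two-pointer scan of t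
theorem bFold_eq_twoPtr (t : List Char) :
    ∀ (m : Nat) (i cost : Int), 0 ≤ i → ((t.length : Int) / 2 - i).toNat ≤ m →
      (PySem.List.pyRange i (PySem.Int.floordiv (t.length : Int) 2) 1).foldl
        (fun cost j =>
          cost + humming_distance (PySem.List.pyGetD t j ' ')
            (PySem.List.pyGetD t ((t.length : Int) - 1 - j) ' '))
        cost
      = twoPtr t cost i ((t.length : Int) - 1 - i) := by
  intro m
  induction m with
  | zero =>
    intro i cost hi hm
    rw [PySem.Int.floordiv_eq_ediv_of_pos (by omega)]
    rw [PySem.List.pyRange_one_eq_nil (by omega)]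
    rw [twoPtr, if_neg (by omega)]
    simp only [List.foldl_nil]
  | succ m ih =>
    intro i cost hi hm
    rw [PySem.Int.floordiv_eq_ediv_of_pos (by omega)]
    by_cases h : i < (t.length : Int) / 2
    · rw [twoPtr, if_pos (by omega)]
      rw [PySem.List.pyRange_one_cons h]
      simp only [List.foldl_cons]
      have h2 : (t.length : Int) - 1 - i - 1 = (t.length : Int) - 1 - (i + 1) := by ring
      rw [h2]
      have := ih (i + 1) (cost + humming_distance (PySem.List.pyGetD t i ' ')
        (PySem.List.pyGetD t ((t.length : Int) - 1 - i) ' ')) (by omega) (by omega)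
      rw [PySem.Int.floordiv_eq_ediv_of_pos (by omega)] at this
      exact this
    · rw [PySem.List.pyRange_one_eq_nil (by omega)]
      rw [twoPtr, if_neg (by omega)]
      simp only [List.foldl_nil]

-- the out-of-range-k case: A's skip branches never fire, so A is the plain two-pointer scan
theorem aLoop_eq_twoPtr_of_miss (cs : List Char) (k : Int) :
    ∀ (m : Nat) (l r cost : Int), (r - l).toNat ≤ m → (k < l ∨ r < k) →
      deletionLoopA cs k cost l r = twoPtr cs cost l r := by
  intro m
  induction m with
  | zero =>
    intro l r cost hm hk
    rw [deletionLoopA, twoPtr, if_neg (by omega), if_neg (by omega)]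
  | succ m ih =>
    intro l r cost hm hk
    rw [deletionLoopA, twoPtr]
    by_cases h : l < r
    · rw [if_pos h, if_pos h, if_neg (by omega), if_neg (by omega)]
      exact ih _ _ _ (by omega) (by omega)
    · rw [if_neg h, if_neg h]

-- element correspondence: deleting index k shifts indices above k down by one
theorem pyGetD_erase (cs : List Char) (k i : Int) (hk0 : 0 ≤ k) (hkn : k < (cs.length : Int))
    (hi0 : 0 ≤ i) (hin : i < (cs.length : Int)) (hne : i ≠ k) :
    PySem.List.pyGetD (cs.take k.toNat ++ cs.drop (k.toNat + 1)) (if k < i then i - 1 else i) ' '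
      = PySem.List.pyGetD cs i ' ' := by
  have hklen : k.toNat < cs.length := by omega
  have hlen_take : (cs.take k.toNat).length = k.toNat := by
    simp [List.length_take]; omega
  by_cases h : k < i
  · rw [if_pos h]
    rw [PySem.List.pyGetD_eq_getElem _ ' ' (by omega)
      (by simp [List.length_take, List.length_drop]; omega)]
    rw [PySem.List.pyGetD_eq_getElem _ ' ' hi0 hin]
    rw [List.getElem_append_right (by omega)]
    rw [List.getElem_drop]
    congr 1
    simp [hlen_take]
    omega
  · rw [if_neg h]
    have hik : i < k := by omega
    rw [PySem.List.pyGetD_eq_getElem _ ' ' hi0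
      (by simp [List.length_take, List.length_drop]; omega)]
    rw [PySem.List.pyGetD_eq_getElem _ ' ' hi0 hin]
    rw [List.getElem_append_left (by omega)]
    rw [List.getElem_take]

-- the in-range-k case: A's scan with skips equals the two-pointer scan of cs-without-k
theorem aLoop_eq_twoPtr_erase (cs : List Char) (k : Int) (hk0 : 0 ≤ k)
    (hkn : k < (cs.length : Int)) :
    ∀ (m : Nat) (l r cost : Int), (r - l).toNat ≤ m → 0 ≤ l → r < (cs.length : Int) →
      deletionLoopA cs k cost l r
        = twoPtr (cs.take k.toNat ++ cs.drop (k.toNat + 1)) cost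
            (if k < l then l - 1 else l) (if k ≤ r then r - 1 else r) := by
  intro m
  induction m with
  | zero =>
    intro l r cost hm hl hr
    rw [deletionLoopA, if_neg (by omega), twoPtr, if_neg (by split_ifs <;> omega)]
  | succ m ih =>
    intro l r cost hm hl hr
    rw [deletionLoopA]
    by_cases h : l < r
    · rw [if_pos h]
      by_cases hlk : l = k
      · rw [if_pos hlk]
        rw [ih _ _ _ (by omega) (by omega) hr]
        congr 1; split_ifs <;> omega
      · rw [if_neg hlk]
        by_cases hrk : r = k
        · rw [if_pos hrk]
          rw [ih _ _ _ (by omega) hl (by omega)]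
          congr 1; split_ifs <;> omega
        · rw [if_neg hrk]
          rw [twoPtr, if_pos (by split_ifs <;> omega)]
          have hradj : (if k ≤ r then r - 1 else r) = (if k < r then r - 1 else r) := by
            split_ifs <;> omega
          rw [hradj]
          rw [pyGetD_erase cs k l hk0 hkn hl (by omega) hlk]
          rw [pyGetD_erase cs k r hk0 hkn (by omega) hr hrk]
          rw [ih (l + 1) (r - 1) _ (by omega) (by omega) (by omega)]
          congr 1 <;> split_ifs <;> omega
    · rw [if_neg h, twoPtr, if_neg (by split_ifs <;> omega)]

-- ===== VERDICT (by name: the statement is the Claim_ definition above) =====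
theorem deletion_cost_spec : Claim_equal_deletion_cost := by
  intro s k _
  unfold Spec_deletion_cost deletion_cost deletion_cost_alt symmetric_cost
  by_cases hk : 0 ≤ k ∧ k < (s.toList.length : Int)
  · rw [if_pos hk]
    obtain ⟨hk0, hkn⟩ := hk
    rw [PySem.List.slice_to _ hk0, PySem.List.slice_from _ (by omega)]
    have hkt : (k + 1).toNat = k.toNat + 1 := by omega
    rw [hkt]
    set t := s.toList.take k.toNat ++ s.toList.drop (k.toNat + 1) with ht
    have hlen : (t.length : Int) = (s.toList.length : Int) - 1 := by
      rw [ht]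
      simp only [List.length_append, List.length_take, List.length_drop]
      push_cast
      omega
    rw [bFold_eq_twoPtr t ((t.length : Int) / 2 - 0).toNat 0 0 le_rfl le_rfl]
    rw [aLoop_eq_twoPtr_erase s.toList k hk0 hkn
      ((s.toList.length : Int) - 1 - 0).toNat 0 ((s.toList.length : Int) - 1) 0
      (by omega) (by omega) (by omega)]
    simp only [if_neg (show ¬ k < (0:Int) by omega),
      if_pos (show k ≤ (s.toList.length : Int) - 1 by omega)]
    congr 1
    omega
  · rw [if_neg hk]
    rw [bFold_eq_twoPtr s.toList ((s.toList.length : Int) / 2 - 0).toNat 0 0 le_rfl le_rfl]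
    rw [aLoop_eq_twoPtr_of_miss s.toList k ((s.toList.length : Int) - 1 - 0).toNat 0
      ((s.toList.length : Int) - 1) 0 (by omega) (by omega)]
    congr 1
    ring
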